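-- pv_equiv track=rewrite | github.com/Samraa66/telegram-lead-bot | backend/app/services/pipeline.py | infer_stage_id
-- ===== SOURCE A (Python) =====
-- from typing import List, Optional, Tuple
--
-- def _normalize(text: str) -> str:
--     return " ".join((text or "").lower().split())
--
-- def infer_stage_id(
--     message_text: str,
--     keywords: List[Tuple[str, int]],
-- ) -> Optional[Tuple[int, str]]:
--     """
--     Return (target_stage_id, trigger_keyword) for the highest-stage_id keyword
--     matched. The caller resolves the actual position to enforce monotonic
--     advance ordering.
--     """
--     text = _normalize(message_text)
--     best_id: Optional[int] = None
--     best_keyword: Optional[str] = None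
--     for keyword, stage_id in keywords:
--         if _normalize(keyword) in text:
--             if best_id is None or stage_id > best_id:
--                 best_id = stage_id
--                 best_keyword = keyword
--     if best_id is None:
--         return None
--     return best_id, best_keyword or ""
-- ===== SOURCE B (Python) =====
-- from typing import List, Optional, Tuple
--
-- def _normalize(text: str) -> str:
--     return " ".join((text or "").lower().split())
--
-- def infer_stage_id(
--     message_text: str,
--     keywords: List[Tuple[str, int]],
-- ) -> Optional[Tuple[int, str]]:
--     text = _normalize(message_text)
--     # Stable sort descending by stage_id, then return the FIRST keyword that
--     # matches: stability makes this the earliest-listed keyword among those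
--     # with the maximal stage_id, exactly A's strict '>' running-max rule.
--     for keyword, stage_id in sorted(keywords, key=lambda kv: kv[1], reverse=True):
--         if _normalize(keyword) in text:
--             return stage_id, keyword
--     return None
-- ===== Notes on version B (the rewrite author's own statement) =====
-- stated objective: alternative
-- what changed: Replaces A's full scan with a running-max accumulator by a stable descending sort on stage_id followed by an early-exit scan that returns the first matching keyword; sort stability reproduces A's first-of-max tie-breaking exactly.
import Mathlib
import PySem

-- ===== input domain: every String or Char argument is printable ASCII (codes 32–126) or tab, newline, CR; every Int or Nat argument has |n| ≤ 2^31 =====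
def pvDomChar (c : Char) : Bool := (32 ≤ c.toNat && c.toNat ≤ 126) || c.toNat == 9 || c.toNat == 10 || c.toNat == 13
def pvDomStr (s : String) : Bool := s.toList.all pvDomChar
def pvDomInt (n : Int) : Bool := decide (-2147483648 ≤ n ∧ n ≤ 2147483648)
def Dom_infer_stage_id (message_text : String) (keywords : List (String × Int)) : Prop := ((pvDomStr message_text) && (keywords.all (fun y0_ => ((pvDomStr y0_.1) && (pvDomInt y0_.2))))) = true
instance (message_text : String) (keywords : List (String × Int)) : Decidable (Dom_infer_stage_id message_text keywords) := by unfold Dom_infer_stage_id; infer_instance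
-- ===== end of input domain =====

-- ===== PORT A =====
-- B sorts the keywords stably descending by stage_id and returns the first match
-- (early exit), instead of A's full scan with a running-max accumulator (alternative,
-- same worst-case cost).
-- shared helper: both Pythons define the identical _normalize(text) = " ".join((text or "").lower().split())
def pvNorm (s : String) : String :=
  PySem.Str.join " " (PySem.Str.split₀ (PySem.Str.lower s))

def infer_stage_id (message_text : String) (keywords : List (String × Int)) : Option (Int × String) :=
  let text := pvNorm message_text
  let st := keywords.foldl
    (fun (b : Option Int × Option String) kv =>
      if PySem.Str.isIn (pvNorm kv.1) text then
        match b.1 with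
        | none => (some kv.2, some kv.1)
        | some bid => if kv.2 > bid then (some kv.2, some kv.1) else b
      else b)
    (none, none)
  match st.1 with
  | none => none
  | some bid => some (bid, st.2.getD "")  -- 'best_keyword or ""': None→"", and "" or "" = ""

-- ===== PORT B =====
-- the for-loop with early 'return stage_id, keyword'
def pvScan (text : String) : List (String × Int) → Option (Int × String)
  | [] => none
  | kv :: t => if PySem.Str.isIn (pvNorm kv.1) text then some (kv.2, kv.1) else pvScan text t

def infer_stage_id_alt (message_text : String) (keywords : List (String × Int)) : Option (Int × String) :=
  let text := pvNorm message_text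
  pvScan text (PySem.List.sorted keywords (fun kv => kv.2) true)

-- ===== PRECONDITION & SPEC =====
def Spec_infer_stage_id (message_text : String) (keywords : List (String × Int)) (out : Option (Int × String)) : Prop := out = infer_stage_id_alt message_text keywords
instance (message_text : String) (keywords : List (String × Int)) (out : Option (Int × String)) : Decidable (Spec_infer_stage_id message_text keywords out) := by unfold Spec_infer_stage_id; infer_instance

-- ===== CLAIM =====
def Claim_equal_infer_stage_id : Prop := ∀ (message_text : String) (keywords : List (String × Int)), Dom_infer_stage_id message_text keywords → Spec_infer_stage_id message_text keywords (infer_stage_id message_text keywords)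

-- ===== LEMMAS AND PROOFS =====

-- named copy of A's fold step (proof-side only); c kv decides the substring match
def pvStepA (c : String × Int → Bool) (b : Option Int × Option String) (kv : String × Int) :
    Option Int × Option String :=
  if c kv then
    match b.1 with
    | none => (some kv.2, some kv.1)
    | some bid => if kv.2 > bid then (some kv.2, some kv.1) else b
  else b

-- pvScan is find? (by the same predicate), packaged
theorem pvScan_eq_find? (text : String) (xs : List (String × Int)) :
    pvScan text xs = ((xs.find? fun kv => PySem.Str.isIn (pvNorm kv.1) text).map fun kv => (kv.2, kv.1)) := by
  induction xs with
  | nil => rfl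
  | cons kv t ih =>
    cases h : PySem.Chars.isIn (pvNorm kv.1).toList text.toList <;>
      simp [pvScan, h, ih]

-- one insertion into a key-descending list, seen through find?
theorem find?_insertBy (key : String × Int → Int) (c : String × Int → Bool)
    (x : String × Int) (s : List (String × Int))
    (hs : s.Pairwise (fun a b => key b ≤ key a)) :
    (PySem.List.insertBy (fun a b => decide (key b < key a)) x s).find? c =
      (if c x then
        match s.find? c with
        | none => some x
        | some m => if key m < key x then some x else some m
      else s.find? c) := by
  induction s with
  | nil =>
    by_cases hx : c x = true <;> simp [PySem.List.insertBy, List.find?, hx]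
  | cons y t ih =>
    have hy : ∀ z ∈ t, key z ≤ key y := fun z hz => (List.pairwise_cons.mp hs).1 z hz
    have ht : t.Pairwise (fun a b => key b ≤ key a) := (List.pairwise_cons.mp hs).2
    simp only [PySem.List.insertBy]
    by_cases hlt : key y < key x
    · -- x goes first; anything findable in y :: t has key ≤ key y < key x
      simp only [hlt, decide_true, if_true]
      by_cases hx : c x = true
      · rw [List.find?_cons_of_pos hx, if_pos hx]
        cases hm : List.find? c (y :: t) with
        | none => rfl
        | some m =>
          have hmem := List.mem_of_find?_eq_some hm
          have hky : key m ≤ key y := by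
            rcases List.mem_cons.mp hmem with h | h
            · exact h ▸ le_refl _
            · exact hy m h
          simp [lt_of_le_of_lt hky hlt]
      · rw [List.find?_cons_of_neg hx, if_neg hx]
    · -- key x ≤ key y: x is inserted after y
      have hxy : key x ≤ key y := le_of_not_gt hlt
      simp only [hlt, decide_false, Bool.false_eq_true, if_false]
      by_cases hcy : c y = true
      · simp only [List.find?_cons_of_pos hcy]
        by_cases hx : c x = true
        · rw [if_pos hx, if_neg (not_lt_of_ge hxy)]
        · rw [if_neg hx]
      · simp only [List.find?_cons_of_neg hcy]
        rw [ih ht]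

-- invariant tying A's pair-of-options accumulator to find? over the descending sort
def pvRel (st : Option Int × Option String) (m : Option (String × Int)) : Prop :=
  (st = (none, none) ∧ m = none) ∨ (∃ i k, st = (some i, some k) ∧ m = some (k, i))

theorem pvMain (c : String × Int → Bool) (kws : List (String × Int)) :
    pvRel (kws.foldl (pvStepA c) (none, none))
      ((PySem.List.sorted kws (fun kv => kv.2) true).find? c) := by
  induction kws using List.reverseRecOn with
  | nil => exact Or.inl ⟨rfl, rfl⟩
  | append_singleton xs x ih =>
    have hsort : PySem.List.sorted (xs ++ [x]) (fun kv => kv.2) true =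
        PySem.List.insertBy (fun a b => decide (b.2 < a.2)) x
          (PySem.List.sorted xs (fun kv => kv.2) true) := by
      rw [PySem.List.sorted_rev_eq_foldl_insertBy, PySem.List.sorted_rev_eq_foldl_insertBy,
        List.foldl_append]
      rfl
    have hpw := PySem.List.sorted_pairwise_rev xs (fun kv => kv.2)
    rw [hsort, List.foldl_append,
      find?_insertBy (fun kv => kv.2) c x _ hpw]
    simp only [List.foldl_cons, List.foldl_nil]
    rcases ih with ⟨h1, h2⟩ | ⟨i, k, h1, h2⟩ <;> rw [h1, h2] <;>
      simp only [pvStepA]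
    · by_cases hx : c x = true <;> simp only [hx, if_true]
      · exact Or.inr ⟨x.2, x.1, rfl, rfl⟩
      · exact Or.inl ⟨rfl, rfl⟩
    · by_cases hx : c x = true <;> simp only [hx, if_true]
      · by_cases hlt : i < x.2
        · simp only [gt_iff_lt, hlt, if_true]
          exact Or.inr ⟨x.2, x.1, rfl, rfl⟩
        · simp only [gt_iff_lt, hlt, if_false]
          exact Or.inr ⟨i, k, rfl, rfl⟩
      · exact Or.inr ⟨i, k, rfl, rfl⟩

-- the port's anonymous fold step is the named one
theorem pvFoldA_eq (c : String × Int → Bool) (kws : List (String × Int))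
    (st : Option Int × Option String) :
    kws.foldl
      (fun (b : Option Int × Option String) kv =>
        if c kv then
          match b.1 with
          | none => (some kv.2, some kv.1)
          | some bid => if kv.2 > bid then (some kv.2, some kv.1) else b
        else b) st = kws.foldl (pvStepA c) st := by
  congr 1

-- ===== VERDICT =====
theorem infer_stage_id_spec : Claim_equal_infer_stage_id := by
  intro message_text keywords _
  unfold Spec_infer_stage_id infer_stage_id infer_stage_id_alt
  simp only []
  rw [pvFoldA_eq (fun kv => PySem.Str.isIn (pvNorm kv.1) (pvNorm message_text)),
    pvScan_eq_find?]
  have h := pvMain (fun kv => PySem.Str.isIn (pvNorm kv.1) (pvNorm message_text)) keywords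
  rcases h with ⟨h1, h2⟩ | ⟨i, k, h1, h2⟩ <;> rw [h1, h2] <;> rfl
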